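-- pv_equiv track=rewrite | github.com/c17r/django-avatar | setup.py | create_reqs
-- ===== SOURCE A (Python) =====
-- def create_reqs(data):
--     lines = [l.lstrip() for l in data.split('\n')]
--     needle = None
--     for idx, line in enumerate(lines):
--         if line == "# dev":
--             needle = idx
--             break
--     keeps = lines
--     if needle is not None:
--         keeps = lines[:needle]
--     keeps = [l for l in keeps if l and l[0] != '#']
--     return keeps
-- ===== SOURCE B (Python) =====
-- def create_reqs(data):
--     # Single early-terminating pass: stop at the '# dev' marker,
--     # keep non-empty, non-comment lstripped lines.
--     keeps = []
--     for raw in data.split('\n'):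
--         line = raw.lstrip()
--         if line == "# dev":
--             break
--         if line and line[0] != '#':
--             keeps.append(line)
--     return keeps
-- ===== Notes on version B (the rewrite author's own statement) =====
-- stated objective: simpler
-- what changed: Replaces the three sequential passes (lstrip-map, enumerate-scan for the '# dev' index, slice, then filter) with one early-terminating loop that lstrips, breaks at the marker, and accumulates kept lines directly.
import Mathlib
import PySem

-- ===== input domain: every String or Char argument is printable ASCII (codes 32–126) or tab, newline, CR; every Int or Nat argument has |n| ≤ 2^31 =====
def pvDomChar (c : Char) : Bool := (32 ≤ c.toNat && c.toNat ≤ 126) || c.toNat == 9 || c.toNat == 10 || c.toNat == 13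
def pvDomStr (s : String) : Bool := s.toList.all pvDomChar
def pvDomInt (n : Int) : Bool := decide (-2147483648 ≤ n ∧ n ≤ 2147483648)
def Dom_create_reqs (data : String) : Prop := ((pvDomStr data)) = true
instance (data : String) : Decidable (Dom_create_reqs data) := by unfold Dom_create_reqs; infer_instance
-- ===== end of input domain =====

-- B replaces A's three passes (lstrip map, index scan, slice, filter) with one early-terminating loop; same cost, simpler.

-- ===== PORT A =====
-- the test 'l and l[0] != '#'' shared by both sources
def pvKeep (l : String) : Bool := (l != "") && (PySem.Str.pyGet? l 0 != some '#')

-- the 'for idx, line in enumerate(lines): if line == "# dev": needle = idx; break' loop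
def findNeedleA : List (Int × String) → Option Int
  | [] => none
  | (idx, line) :: rest => if line = "# dev" then some idx else findNeedleA rest

def create_reqs (data : String) : List String :=
  let lines := (((PySem.Str.split? data "\n").getD [])).map PySem.Str.lstrip
  let needle := findNeedleA (PySem.List.enumerate lines 0)
  let keeps := match needle with
    | some n => PySem.List.slice lines none (some n)
    | none => lines
  keeps.filter pvKeep

-- ===== PORT B =====
-- the single 'for raw in data.split('\n'): … break / append' loop of Source B
def loopB : List String → List String
  | [] => []
  | raw :: rest =>
    let line := PySem.Str.lstrip raw
    if line = "# dev" then []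
    else if pvKeep line then line :: loopB rest
    else loopB rest

def create_reqs_alt (data : String) : List String :=
  loopB (((PySem.Str.split? data "\n").getD []))

-- ===== PRECONDITION & SPEC =====
def Spec_create_reqs (data : String) (out : List String) : Prop := out = create_reqs_alt data
instance (data : String) (out : List String) : Decidable (Spec_create_reqs data out) := by unfold Spec_create_reqs; infer_instance

-- ===== CLAIM (what is proved, stated in full; the proofs are below) =====
def Claim_equal_create_reqs : Prop := ∀ (data : String), Dom_create_reqs data → Spec_create_reqs data (create_reqs data)

-- ===== LEMMAS AND PROOFS =====

lemma loopB_eq (raw : List String) :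
    loopB raw = ((raw.map PySem.Str.lstrip).takeWhile (fun s => s ≠ "# dev")).filter pvKeep := by
  induction raw with
  | nil => rfl
  | cons x xs ih =>
    simp only [loopB, List.map_cons, List.takeWhile_cons]
    by_cases h : PySem.Str.lstrip x = "# dev"
    · simp [h]
    · cases hk : pvKeep (PySem.Str.lstrip x) <;>
        simp [h, hk, ih]

lemma findNeedleA_eq (L : List String) (k : Int) :
    findNeedleA (PySem.List.enumerate L k) =
      (L.findIdx? (fun s => s = "# dev")).map (fun j => k + j) := by
  induction L generalizing k with
  | nil => simp [findNeedleA, PySem.List.enumerate_nil]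
  | cons x xs ih =>
    rw [PySem.List.enumerate_cons, List.findIdx?_cons]
    by_cases h : x = "# dev"
    · simp [findNeedleA, h]
    · simp only [findNeedleA, h, if_neg, decide_eq_true_eq, ih (k + 1),
        Option.map_map]
      simp [h]
      cases xs.findIdx? (fun s => s = "# dev") with
      | none => rfl
      | some j => simp; ring

lemma take_findIdx (L : List String) :
    (match L.findIdx? (fun s => s = "# dev") with
     | some n => L.take n
     | none => L) = L.takeWhile (fun s => s ≠ "# dev") := by
  induction L with
  | nil => rfl
  | cons x xs ih =>
    rw [List.findIdx?_cons, List.takeWhile_cons]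
    by_cases h : x = "# dev"
    · simp [h]
    · simp only [h, decide_false]
      cases hx : xs.findIdx? (fun s => s = "# dev") with
      | none => simp [hx, h] at ih ⊢; exact ih
      | some n => simp [hx, h] at ih ⊢; exact ih

-- ===== VERDICT (by name: the statement is the Claim_ definition above) =====
theorem create_reqs_spec : Claim_equal_create_reqs := by
  intro data _
  show create_reqs data = create_reqs_alt data
  unfold create_reqs create_reqs_alt
  rw [loopB_eq]
  set L := ((PySem.Str.split? data "\n").getD []).map PySem.Str.lstrip with hL
  clear hL
  show (match findNeedleA (PySem.List.enumerate L 0) with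
        | some n => PySem.List.slice L none (some n)
        | none => L).filter pvKeep = _
  rw [findNeedleA_eq L 0]
  have ht := take_findIdx L
  cases hx : L.findIdx? (fun s => s = "# dev") with
  | none =>
    simp only [hx] at ht
    simp only [Option.bind_eq_bind, Option.bind_none, Option.map_none]
    exact congrArg (List.filter pvKeep) ht
  | some n =>
    simp only [hx, zero_add] at ht ⊢
    simp only [Option.bind_eq_bind, Option.bind_some, Option.pure_def, Option.map_some]
    rw [PySem.List.slice_to_natCast, ht]
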